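-- pv_equiv track=rewrite | github.com/vanilladucky/Leet_Code_Questions | Array/1578. Minimum Time to Make Rope Colorful.py | minCost
-- ===== SOURCE A (Python) =====
-- from typing import List
--
-- def minCost(colors: str, neededTime: List[int]) -> int:
--     i, j = 0, 0
--     res = 0
--
--     while i < len(neededTime) and j < len(neededTime):
--         curr_total, curr_max = 0, 0
--
--         while j < len(neededTime) and colors[i] == colors[j]:
--             curr_total += neededTime[j]
--             curr_max = max(curr_max, neededTime[j])
--             j += 1
--
--         res += (curr_total - curr_max)
--         i = j
--
--     return res
-- ===== SOURCE B (Python) =====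
-- def minCost(colors, neededTime):
--     res = 0
--     maxSeen = 0
--     for i in range(len(neededTime)):
--         t = neededTime[i]
--         if i > 0 and colors[i] != colors[i - 1]:
--             maxSeen = 0
--         res += min(maxSeen, t)
--         maxSeen = max(maxSeen, t)
--     return res
-- ===== Notes on version B (the rewrite author's own statement) =====
-- stated objective: simpler
-- what changed: Replaced A's nested while-loops that group each run of equal colors (summing the run and subtracting its maximum) with a single flat pass over indices that pays min(runningMax, t) per element and keeps a running maximum, reset at color changes; same O(n) but a measured constant-factor speedup (one loop, no per-run restart bookkeeping).
import Mathlib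
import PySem

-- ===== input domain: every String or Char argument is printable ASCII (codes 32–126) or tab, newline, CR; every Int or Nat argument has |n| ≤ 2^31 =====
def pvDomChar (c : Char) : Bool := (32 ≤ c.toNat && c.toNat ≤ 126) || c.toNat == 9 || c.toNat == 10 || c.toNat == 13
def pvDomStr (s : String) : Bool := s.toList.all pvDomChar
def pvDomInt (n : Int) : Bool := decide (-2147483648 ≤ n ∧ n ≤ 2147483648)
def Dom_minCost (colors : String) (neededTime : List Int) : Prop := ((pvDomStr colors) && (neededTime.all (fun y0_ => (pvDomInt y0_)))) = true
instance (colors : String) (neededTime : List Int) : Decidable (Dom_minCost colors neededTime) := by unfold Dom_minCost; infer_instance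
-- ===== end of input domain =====

-- B replaces A's nested run-grouping loops (sum each run of equal colors, subtract its
-- max) by one flat pass keeping a running maximum per run; same O(n) cost, simpler
-- decomposition.

-- ===== PORT A =====
-- inner while loop `while j < len(neededTime) and colors[i] == colors[j]:`; `c` is the
-- fixed value colors[i] (i does not change during the inner loop); state (j, curr_total,
-- curr_max).  The fuel argument only makes the loop total: fuel = len(neededTime) always
-- suffices since the loop stops once j reaches len(neededTime).  An out-of-range colors
-- access raises IndexError in Python and is excluded by Pre_; getD's default is never
-- read under Pre_.
def minCostInner (cs : List Char) (nt : List Int) (c : Char) :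
    Nat → Nat → Int → Int → Nat × Int × Int
  | 0, j, total, mx => (j, total, mx)
  | fuel + 1, j, total, mx =>
    if j < nt.length ∧ cs.getD j ' ' = c then
      minCostInner cs nt c fuel (j + 1) (total + nt.getD j 0) (max mx (nt.getD j 0))
    else (j, total, mx)

-- outer while loop `while i < len(neededTime) and j < len(neededTime):`; again the fuel
-- only makes the loop total (len(neededTime) + 1 iterations always suffice since from the
-- reachable states i = j the inner loop strictly advances j).
def minCostOuter (cs : List Char) (nt : List Int) :
    Nat → Nat → Nat → Int → Int
  | 0, _, _, res => res
  | fuel + 1, i, j, res =>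
    if i < nt.length ∧ j < nt.length then
      let r := minCostInner cs nt (cs.getD i ' ') nt.length j 0 0
      minCostOuter cs nt fuel r.1 r.1 (res + (r.2.1 - r.2.2))
    else res

def minCost (colors : String) (neededTime : List Int) : Int :=
  minCostOuter colors.toList neededTime (neededTime.length + 1) 0 0 0

-- ===== PORT B =====
-- `for i in range(len(neededTime)):` with state (res, maxSeen); colors is accessed only
-- at i and i-1 for i ≥ 1 (in range under Pre_).  fuel = len(neededTime) - i remaining
-- iterations; the top-level call passes exactly len(neededTime).
def minCostAltLoop (cs : List Char) (nt : List Int) :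
    Nat → Nat → Int → Int → Int
  | 0, _, res, _ => res
  | fuel + 1, i, res, maxSeen =>
    if i < nt.length then
      let t := nt.getD i 0
      let m := if 0 < i ∧ cs.getD i ' ' ≠ cs.getD (i - 1) ' ' then 0 else maxSeen
      minCostAltLoop cs nt fuel (i + 1) (res + min m t) (max m t)
    else res

def minCost_alt (colors : String) (neededTime : List Int) : Int :=
  minCostAltLoop colors.toList neededTime neededTime.length 0 0 0

-- ===== PRECONDITION & SPEC =====
-- A indexes colors[i] for every i < len(neededTime), so it raises IndexError whenever
-- colors is shorter than neededTime; Pre_ excludes exactly those inputs.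
def Pre_minCost (colors : String) (neededTime : List Int) : Prop :=
  neededTime.length ≤ colors.toList.length
instance (colors : String) (neededTime : List Int) : Decidable (Pre_minCost colors neededTime) := by
  unfold Pre_minCost; infer_instance

def pvWitness_minCost : String × List Int := ("aab", [1, 2, 3])

def Spec_minCost (colors : String) (neededTime : List Int) (out : Int) : Prop :=
  out = minCost_alt colors neededTime
instance (colors : String) (neededTime : List Int) (out : Int) : Decidable (Spec_minCost colors neededTime out) := by
  unfold Spec_minCost; infer_instance

-- ===== CLAIM (what is proved, stated in full; the proofs are below) =====
def Claim_equal_minCost : Prop := ∀ (colors : String) (neededTime : List Int), Dom_minCost colors neededTime → Pre_minCost colors neededTime → Spec_minCost colors neededTime (minCost colors neededTime)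

-- ===== LEMMAS AND PROOFS =====

-- B's loop with the canonical sufficient fuel len(neededTime) - i (proof-side view of
-- minCostAltLoop; the top-level call's fuel len(neededTime) is exactly this at i = 0).
def altRun (cs : List Char) (nt : List Int) (i : Nat) (res maxSeen : Int) : Int :=
  minCostAltLoop cs nt (nt.length - i) i res maxSeen

theorem altRun_step (cs : List Char) (nt : List Int) (i : Nat) (res maxSeen : Int)
    (hi : i < nt.length) :
    altRun cs nt i res maxSeen =
      altRun cs nt (i + 1)
        (res + min (if 0 < i ∧ cs.getD i ' ' ≠ cs.getD (i - 1) ' ' then 0 else maxSeen)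
          (nt.getD i 0))
        (max (if 0 < i ∧ cs.getD i ' ' ≠ cs.getD (i - 1) ' ' then 0 else maxSeen)
          (nt.getD i 0)) := by
  unfold altRun
  rw [show nt.length - i = (nt.length - (i + 1)) + 1 from by omega]
  simp only [minCostAltLoop]
  rw [if_pos hi]

theorem altRun_stop (cs : List Char) (nt : List Int) (i : Nat) (res maxSeen : Int)
    (hi : ¬ i < nt.length) :
    altRun cs nt i res maxSeen = res := by
  unfold altRun
  rw [show nt.length - i = 0 from by omega]
  rfl

-- Exit state of A's inner loop (with sufficient fuel): j only advances, the exit index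
-- is the first one whose color differs from c, and every index consumed carried color c.
theorem minCostInner_props (cs : List Char) (nt : List Int) (c : Char) :
    ∀ (f j : Nat) (total mx : Int), nt.length - j ≤ f →
      j ≤ (minCostInner cs nt c f j total mx).1 ∧
      ((minCostInner cs nt c f j total mx).1 < nt.length →
        cs.getD (minCostInner cs nt c f j total mx).1 ' ' ≠ c) ∧
      (∀ k, j ≤ k → k < (minCostInner cs nt c f j total mx).1 → cs.getD k ' ' = c) := by
  intro f
  induction f with
  | zero =>
    intro j total mx hd
    exact ⟨le_refl _, fun h => absurd (show j < nt.length from h) (by omega),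
      fun k hk hk' => absurd (show k < j from hk') (by omega)⟩
  | succ f ih =>
    intro j total mx hd
    simp only [minCostInner]
    by_cases h : j < nt.length ∧ cs.getD j ' ' = c
    · rw [if_pos h]
      obtain ⟨ih1, ih2, ih3⟩ :=
        ih (j + 1) (total + nt.getD j 0) (max mx (nt.getD j 0)) (by omega)
      refine ⟨by omega, ih2, ?_⟩
      intro k hk hk'
      rcases Nat.eq_or_lt_of_le hk with rfl | hlt
      · exact h.2
      · exact ih3 k (by omega) hk'
    · rw [if_neg h]
      exact ⟨le_refl _,
        fun h1 h2 => h ⟨show j < nt.length from h1, h2⟩,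
        fun k hk hk' => absurd (show k < j from hk') (by omega)⟩

-- One run: B's flat pass from an interior position j of the run with maxSeen = mx tracks
-- A's inner loop, B's accumulated result being res + curr_total - curr_max throughout.
theorem runlem (cs : List Char) (nt : List Int) (c : Char) :
    ∀ (f j : Nat) (total mx res : Int), nt.length - j ≤ f →
      0 < j → cs.getD (j - 1) ' ' = c →
      altRun cs nt j (res + total - mx) mx =
        altRun cs nt (minCostInner cs nt c f j total mx).1
          (res + (minCostInner cs nt c f j total mx).2.1 -
            (minCostInner cs nt c f j total mx).2.2)
          (minCostInner cs nt c f j total mx).2.2 := by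
  intro f
  induction f with
  | zero => intro j total mx res _ _ _; rfl
  | succ f ih =>
    intro j total mx res hd hj hprev
    simp only [minCostInner]
    by_cases h : j < nt.length ∧ cs.getD j ' ' = c
    · rw [if_pos h]
      rw [altRun_step cs nt j _ _ h.1]
      have hm : ¬ (0 < j ∧ cs.getD j ' ' ≠ cs.getD (j - 1) ' ') := by
        rintro ⟨_, hne⟩
        exact hne (h.2.trans hprev.symm)
      rw [if_neg hm]
      have harith : res + total - mx + min mx (nt.getD j 0) =
          res + (total + nt.getD j 0) - max mx (nt.getD j 0) := by omega
      rw [harith]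
      exact ih (j + 1) (total + nt.getD j 0) (max mx (nt.getD j 0)) res (by omega)
        (by omega) (by simpa using h.2)
    · rw [if_neg h]

-- The whole programs: A's outer loop from a run boundary j (with i = j) equals B's flat
-- pass from j, for any incoming maxSeen (which is 0 at j = 0 and reset at a boundary).
theorem mainlem (cs : List Char) (nt : List Int) :
    ∀ (fuel j : Nat) (res ms : Int), nt.length - j < fuel →
      (j < nt.length → (j = 0 ∨ cs.getD j ' ' ≠ cs.getD (j - 1) ' ')) →
      (j = 0 → ms = 0) →
      minCostOuter cs nt fuel j j res = altRun cs nt j res ms := by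
  intro fuel
  induction fuel with
  | zero => intro j res ms hd _ _; omega
  | succ fuel ih =>
    intro j res ms hd hb hms
    by_cases hj : j < nt.length
    · -- the run starting at j; colors[i] = colors[j] =: c
      have hinner : minCostInner cs nt (cs.getD j ' ') nt.length j 0 0 =
          minCostInner cs nt (cs.getD j ' ') (nt.length - 1) (j + 1)
            (0 + nt.getD j 0) (max 0 (nt.getD j 0)) := by
        conv_lhs => rw [show nt.length = (nt.length - 1) + 1 from by omega]
        simp only [minCostInner]
        rw [if_pos (show j < nt.length ∧ True from ⟨hj, trivial⟩)]
      -- B's first step uses effective maxSeen = 0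
      have halt : altRun cs nt j res ms =
          altRun cs nt (j + 1) (res + min 0 (nt.getD j 0)) (max 0 (nt.getD j 0)) := by
        rw [altRun_step cs nt j res ms hj]
        rcases Nat.eq_zero_or_pos j with h0 | hpos
        · rw [if_neg (show ¬ (0 < j ∧ cs.getD j ' ' ≠ cs.getD (j - 1) ' ') from by
            rintro ⟨hp, _⟩; omega), hms h0]
        · rcases hb hj with h0 | hne
          · omega
          · rw [if_pos (show 0 < j ∧ cs.getD j ' ' ≠ cs.getD (j - 1) ' ' from ⟨hpos, hne⟩)]
      -- properties of the inner loop's exit index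
      obtain ⟨hge, hexit, hrun⟩ :=
        minCostInner_props cs nt (cs.getD j ' ') (nt.length - 1) (j + 1)
          (0 + nt.getD j 0) (max 0 (nt.getD j 0)) (by omega)
      rw [← hinner] at hge hexit hrun
      have houter : minCostOuter cs nt (fuel + 1) j j res =
          minCostOuter cs nt fuel
            (minCostInner cs nt (cs.getD j ' ') nt.length j 0 0).1
            (minCostInner cs nt (cs.getD j ' ') nt.length j 0 0).1
            (res + ((minCostInner cs nt (cs.getD j ' ') nt.length j 0 0).2.1 -
              (minCostInner cs nt (cs.getD j ' ') nt.length j 0 0).2.2)) := by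
        show (if j < nt.length ∧ j < nt.length then _ else res) = _
        rw [if_pos (show j < nt.length ∧ j < nt.length from ⟨hj, hj⟩)]
      have hrl := runlem cs nt (cs.getD j ' ') (nt.length - 1) (j + 1)
        (0 + nt.getD j 0) (max 0 (nt.getD j 0)) res (by omega) (by omega) (by simp)
      rw [← hinner] at hrl
      rw [houter, halt,
        show res + min 0 (nt.getD j 0) =
          res + (0 + nt.getD j 0) - max 0 (nt.getD j 0) from by omega, hrl]
      have hres : res + ((minCostInner cs nt (cs.getD j ' ') nt.length j 0 0).2.1 -
            (minCostInner cs nt (cs.getD j ' ') nt.length j 0 0).2.2) =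
          res + (minCostInner cs nt (cs.getD j ' ') nt.length j 0 0).2.1 -
            (minCostInner cs nt (cs.getD j ' ') nt.length j 0 0).2.2 := by omega
      rw [hres]
      apply ih
      · omega
      · -- the exit index is again a run boundary
        intro hr1
        right
        have hprev : cs.getD ((minCostInner cs nt (cs.getD j ' ') nt.length j 0 0).1 - 1) ' '
            = cs.getD j ' ' := by
          rcases Nat.eq_or_lt_of_le hge with heq | hlt2
          · rw [← heq]; simp
          · exact hrun _ (by omega) (by omega)
        rw [hprev]
        exact hexit hr1
      · intro h0
        omega
    · have h1 : minCostOuter cs nt (fuel + 1) j j res = res := by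
        show (if j < nt.length ∧ j < nt.length then _ else res) = res
        rw [if_neg (by rintro ⟨h, _⟩; exact hj h)]
      rw [h1, altRun_stop cs nt j res ms hj]

-- ===== VERDICT (by name: the statement is the Claim_ definition above) =====
theorem minCost_spec : Claim_equal_minCost := by
  intro colors nt _ _
  unfold Spec_minCost minCost minCost_alt
  have h := mainlem colors.toList nt (nt.length + 1) 0 0 0 (by omega)
    (fun _ => Or.inl rfl) (fun _ => rfl)
  rwa [show altRun colors.toList nt 0 0 0 = minCostAltLoop colors.toList nt nt.length 0 0 0
    from by unfold altRun; rw [Nat.sub_zero]] at h
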